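-- pv_equiv track=rewrite | github.com/gravelLab/pedigree-ARG-matching | alignment/graph_matcher.py | _are_paths_disjoint
-- ===== SOURCE A (Python) =====
-- def _are_paths_disjoint(paths):
--     seen = set()
--     for path in paths:
--         for vertex in path:
--             if vertex in seen:
--                 return False
--             seen.add(vertex)
--     return True
-- ===== SOURCE B (Python) =====
-- def _are_paths_disjoint(paths):
--     flat = sorted(v for p in paths for v in p)
--     for i in range(len(flat) - 1):
--         if flat[i] == flat[i + 1]:
--             return False
--     return True
-- ===== Notes on version B (the rewrite author's own statement) =====
-- stated objective: alternative
-- what changed: Replaces the incremental seen-set with early return by sorting the flattened vertex list and scanning adjacent pairs for an equal neighbour (duplicates become adjacent after sorting).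
import Mathlib
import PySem

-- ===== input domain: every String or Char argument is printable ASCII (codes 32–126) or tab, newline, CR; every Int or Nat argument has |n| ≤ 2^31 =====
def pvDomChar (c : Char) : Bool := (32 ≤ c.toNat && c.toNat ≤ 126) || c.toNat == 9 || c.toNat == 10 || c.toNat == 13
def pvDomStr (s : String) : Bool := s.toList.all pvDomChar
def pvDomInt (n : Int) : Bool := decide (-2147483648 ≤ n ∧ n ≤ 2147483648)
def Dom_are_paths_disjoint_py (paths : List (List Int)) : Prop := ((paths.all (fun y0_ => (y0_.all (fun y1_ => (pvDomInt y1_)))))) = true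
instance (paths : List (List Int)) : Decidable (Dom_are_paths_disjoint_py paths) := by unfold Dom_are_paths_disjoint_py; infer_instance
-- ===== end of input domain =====

-- B replaces the incremental seen-set with early return by sorting the
-- flattened vertex list and scanning adjacent pairs for an equal neighbour
-- (objective: alternative algorithm of similar cost).

-- ===== PORT A =====
-- inner loop: 'for vertex in path', threading 'seen'; none = 'return False'
def apdInner (seen : PySem.Set Int) : List Int → Option (PySem.Set Int)
  | [] => some seen
  | v :: vs =>
    if PySem.Set.contains seen v then none
    else apdInner (PySem.Set.add seen v) vs

-- outer loop: 'for path in paths'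
def apdOuter (seen : PySem.Set Int) : List (List Int) → Bool
  | [] => true
  | p :: ps =>
    match apdInner seen p with
    | none => false
    | some s => apdOuter s ps

def are_paths_disjoint_py (paths : List (List Int)) : Bool :=
  apdOuter PySem.Set.empty paths

-- ===== PORT B =====
-- adjacent-pair scan over the sorted list ('for i in range(len(flat)-1)')
def noAdjDup : List Int → Bool
  | [] => true
  | [_] => true
  | a :: b :: t => if a == b then false else noAdjDup (b :: t)

def are_paths_disjoint_py_alt (paths : List (List Int)) : Bool :=
  let flat := PySem.List.sorted (paths.flatMap (fun p => p)) (fun x => x) false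
  noAdjDup flat

-- ===== PRECONDITION & SPEC =====
def Spec_are_paths_disjoint_py (paths : List (List Int)) (out : Bool) : Prop := out = are_paths_disjoint_py_alt paths
instance (paths : List (List Int)) (out : Bool) : Decidable (Spec_are_paths_disjoint_py paths out) := by unfold Spec_are_paths_disjoint_py; infer_instance

-- ===== CLAIM (what is proved, stated in full; the proofs are below) =====
def Claim_equal_are_paths_disjoint_py : Prop := ∀ (paths : List (List Int)), Dom_are_paths_disjoint_py paths → Spec_are_paths_disjoint_py paths (are_paths_disjoint_py paths)

-- ===== LEMMAS AND PROOFS =====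

lemma apdInner_eq (p : List Int) : ∀ (seen : PySem.Set Int), seen.Nodup →
    apdInner seen p = if (seen ++ p).Nodup then some (seen ++ p) else none := by
  induction p with
  | nil =>
    intro seen h
    simp [apdInner, h]
  | cons v vs ih =>
    intro seen h
    by_cases hv : v ∈ seen
    · have hnn : ¬ (seen ++ v :: vs).Nodup := by
        intro hn
        exact (List.disjoint_of_nodup_append hn) hv List.mem_cons_self
      have hctrue : PySem.Set.contains seen v = true := (PySem.Set.contains_iff seen v).mpr hv
      rw [if_neg hnn]
      simp only [apdInner, hctrue, if_true]
    · have hcont : PySem.Set.contains seen v = false := by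
        cases hc : PySem.Set.contains seen v with
        | false => rfl
        | true => exact absurd ((PySem.Set.contains_iff seen v).mp hc) hv
      have hadd : PySem.Set.add seen v = seen ++ [v] := by
        rw [PySem.Set.add, hcont]
        simp
      have hnd : (seen ++ [v]).Nodup := by
        rw [List.nodup_append]
        refine ⟨h, List.nodup_singleton v, ?_⟩
        intro a ha b hb hab
        rw [List.mem_singleton] at hb
        exact hv ((hab.trans hb) ▸ ha)
      have hassoc : (seen ++ [v]) ++ vs = seen ++ v :: vs := by simp
      rw [show apdInner seen (v :: vs) = apdInner (PySem.Set.add seen v) vs from by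
        simp only [apdInner, hcont, Bool.false_eq_true, if_false]]
      rw [hadd, ih _ hnd, hassoc]

lemma apdOuter_eq (ps : List (List Int)) : ∀ (seen : PySem.Set Int), seen.Nodup →
    apdOuter seen ps = decide ((seen ++ ps.flatMap (fun p => p)).Nodup) := by
  induction ps with
  | nil =>
    intro seen h
    simp [apdOuter, h]
  | cons p ps ih =>
    intro seen h
    by_cases hp : (seen ++ p).Nodup
    · have : apdOuter seen (p :: ps) = apdOuter (seen ++ p) ps := by
        simp [apdOuter, apdInner_eq p seen h, hp]
      rw [this, ih _ hp]
      simp [List.append_assoc]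
    · have hwhole : ¬ (seen ++ (p :: ps).flatMap (fun p => p)).Nodup := by
        intro hn
        apply hp
        have hsub : (seen ++ p).Sublist (seen ++ (p :: ps).flatMap (fun p => p)) := by
          simp only [List.flatMap_cons, ← List.append_assoc]
          exact (List.sublist_append_left _ _)
        exact hn.sublist hsub
      simp [apdOuter, apdInner_eq p seen h, hp]
      simpa using hwhole

-- on a ≤-sorted list, 'no equal adjacent pair' is exactly Nodup
lemma noAdjDup_eq_nodup : ∀ (s : List Int), s.Pairwise (· ≤ ·) →
    noAdjDup s = decide s.Nodup := by
  intro s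
  induction s with
  | nil => intro _; simp [noAdjDup]
  | cons a t ih =>
    intro hp
    cases t with
    | nil => simp [noAdjDup]
    | cons b u =>
      have hab : a ≤ b := (List.pairwise_cons.mp hp).1 b List.mem_cons_self
      have hpt : (b :: u).Pairwise (· ≤ ·) := (List.pairwise_cons.mp hp).2
      by_cases he : a = b
      · simp [noAdjDup, he]
      · have hlt : a < b := lt_of_le_of_ne hab he
        have hnotmem : a ∉ b :: u := by
          intro hm
          rcases List.mem_cons.mp hm with h1 | h2
          · exact he h1
          · have hbx : b ≤ a := (List.pairwise_cons.mp hpt).1 a h2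
            exact absurd (lt_of_lt_of_le hlt hbx) (lt_irrefl a)
        have : noAdjDup (a :: b :: u) = noAdjDup (b :: u) := by
          simp [noAdjDup, he]
        rw [this, ih hpt]
        simp [List.nodup_cons, hnotmem]

lemma alt_eq (paths : List (List Int)) :
    are_paths_disjoint_py_alt paths = decide ((paths.flatMap (fun p => p)).Nodup) := by
  unfold are_paths_disjoint_py_alt
  set flat := paths.flatMap (fun p => p) with hf
  have hpair : (PySem.List.sorted flat (fun x => x) false).Pairwise (· ≤ ·) :=
    PySem.List.sorted_pairwise flat (fun x => x)
  have hperm : (PySem.List.sorted flat (fun x => x) false).Perm flat :=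
    PySem.List.sorted_perm flat (fun x => x) false
  rw [noAdjDup_eq_nodup _ hpair]
  simp [hperm.nodup_iff]

-- ===== VERDICT (by name: the statement is the Claim_ definition above) =====
theorem are_paths_disjoint_py_spec : Claim_equal_are_paths_disjoint_py := by
  intro paths _
  unfold Spec_are_paths_disjoint_py are_paths_disjoint_py
  rw [alt_eq, apdOuter_eq paths PySem.Set.empty (by simp [PySem.Set.empty])]
  simp [PySem.Set.empty]
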